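-- pv_equiv track=rewrite | github.com/bautifossati/coach-whatsapp-personal | scheduler.py | _formatear_tareas_mensaje
-- ===== SOURCE A (Python) =====
-- def _formatear_tareas_mensaje(tareas: list) -> str:
--     """Convierte una lista de tareas en un bloque de texto para WhatsApp."""
--     if not tareas:
--         return "📋 *Tareas de hoy:* No encontré tareas en el Sheets para hoy.\n\n"
--
--     pendientes = [t for t in tareas if str(t.get("Estado", "")).lower() not in ["completada", "completa"]]
--     completadas = [t for t in tareas if str(t.get("Estado", "")).lower() in ["completada", "completa"]]
--
--     lineas = ["📋 *Tareas de hoy:*"]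
--     for t in pendientes:
--         prioridad = t.get("Prioridad", "Media")
--         emoji = "🔴" if prioridad == "Alta" else "🟡" if prioridad == "Media" else "🟢"
--         lineas.append(f"{emoji} {t.get('Tarea', 'Sin nombre')}")
--
--     if completadas:
--         lineas.append(f"\n✅ Completadas: {len(completadas)}")
--
--     return "\n".join(lineas) + "\n\n"
-- ===== SOURCE B (Python) =====
-- def _formatear_tareas_mensaje(tareas: list) -> str:
--     """Convierte una lista de tareas en un bloque de texto para WhatsApp."""
--     if not tareas:
--         return "📋 *Tareas de hoy:* No encontré tareas en el Sheets para hoy.\n\n"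
--
--     texto = "📋 *Tareas de hoy:*"
--     completadas = 0
--     for t in tareas:
--         if str(t.get("Estado", "")).lower() in ("completada", "completa"):
--             completadas += 1
--         else:
--             prioridad = t.get("Prioridad", "Media")
--             emoji = "🔴" if prioridad == "Alta" else "🟡" if prioridad == "Media" else "🟢"
--             texto += "\n" + emoji + " " + str(t.get("Tarea", "Sin nombre"))
--     if completadas:
--         texto += "\n\n✅ Completadas: " + str(completadas)
--     return texto + "\n\n"
-- ===== Notes on version B (the rewrite author's own statement) =====
-- stated objective: simpler
-- what changed: Replaces the two filter comprehensions plus a separate formatting loop (three passes over tareas and an intermediate lines list) by a single pass that accumulates the message string directly and counts completed tasks with an integer counter.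
import Mathlib
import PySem

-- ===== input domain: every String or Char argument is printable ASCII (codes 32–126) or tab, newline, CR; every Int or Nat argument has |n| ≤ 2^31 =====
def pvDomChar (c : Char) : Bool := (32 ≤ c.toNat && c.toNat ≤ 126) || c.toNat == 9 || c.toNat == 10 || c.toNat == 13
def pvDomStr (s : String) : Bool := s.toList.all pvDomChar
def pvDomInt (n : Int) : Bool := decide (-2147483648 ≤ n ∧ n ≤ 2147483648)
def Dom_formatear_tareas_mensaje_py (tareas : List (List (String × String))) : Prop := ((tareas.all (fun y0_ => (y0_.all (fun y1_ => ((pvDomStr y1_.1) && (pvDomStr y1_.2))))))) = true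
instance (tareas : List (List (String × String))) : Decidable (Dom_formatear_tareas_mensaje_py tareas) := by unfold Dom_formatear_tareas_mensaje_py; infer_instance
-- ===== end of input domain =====

-- B builds the WhatsApp message in one pass over `tareas`, accumulating the text
-- directly and counting completed tasks, instead of A's two filter comprehensions
-- plus a separate formatting loop over an intermediate list of lines (objective: simpler).

-- shared primitive: Python's t.get(key, default) on an association list (first match)
def pvGet (t : List (String × String)) (k d : String) : String :=
  ((t.find? (fun p => p.1 == k)).map Prod.snd).getD d

-- ===== PORT A =====
def formatear_tareas_mensaje_py (tareas : List (List (String × String))) : String :=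
  if tareas.isEmpty then "📋 *Tareas de hoy:* No encontré tareas en el Sheets para hoy.\n\n"
  else
    let pendientes := tareas.filter (fun t =>
      !((PySem.Str.lower (pvGet t "Estado" "") == "completada") ||
        (PySem.Str.lower (pvGet t "Estado" "") == "completa")))
    let completadas := tareas.filter (fun t =>
      (PySem.Str.lower (pvGet t "Estado" "") == "completada") ||
      (PySem.Str.lower (pvGet t "Estado" "") == "completa"))
    let lineas := pendientes.foldl (fun acc t =>
      let prioridad := pvGet t "Prioridad" "Media"
      let emoji := if prioridad == "Alta" then "🔴" else if prioridad == "Media" then "🟡" else "🟢"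
      acc ++ [emoji ++ " " ++ pvGet t "Tarea" "Sin nombre"]) ["📋 *Tareas de hoy:*"]
    let lineas := if !completadas.isEmpty
      then lineas ++ ["\n✅ Completadas: " ++ PySem.Int.toStr (completadas.length : Int)]
      else lineas
    PySem.Str.join "\n" lineas ++ "\n\n"

-- ===== PORT B =====
def formatear_tareas_mensaje_py_alt (tareas : List (List (String × String))) : String :=
  if tareas.isEmpty then "📋 *Tareas de hoy:* No encontré tareas en el Sheets para hoy.\n\n"
  else
    let st := tareas.foldl (fun (acc : String × Int) t =>
      let estado := PySem.Str.lower (pvGet t "Estado" "")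
      if estado == "completada" || estado == "completa" then (acc.1, acc.2 + 1)
      else
        let prioridad := pvGet t "Prioridad" "Media"
        let emoji := if prioridad == "Alta" then "🔴" else if prioridad == "Media" then "🟡" else "🟢"
        (acc.1 ++ "\n" ++ emoji ++ " " ++ pvGet t "Tarea" "Sin nombre", acc.2))
      ("📋 *Tareas de hoy:*", 0)
    let texto := if st.2 ≠ 0 then st.1 ++ "\n\n✅ Completadas: " ++ PySem.Int.toStr st.2 else st.1
    texto ++ "\n\n"

-- ===== PRECONDITION & SPEC =====
def Spec_formatear_tareas_mensaje_py (tareas : List (List (String × String))) (out : String) : Prop := out = formatear_tareas_mensaje_py_alt tareas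
instance (tareas : List (List (String × String))) (out : String) : Decidable (Spec_formatear_tareas_mensaje_py tareas out) := by unfold Spec_formatear_tareas_mensaje_py; infer_instance

-- ===== CLAIM (what is proved, stated in full; the proofs are below) =====
def Claim_equal_formatear_tareas_mensaje_py : Prop := ∀ (tareas : List (List (String × String))), Dom_formatear_tareas_mensaje_py tareas → Spec_formatear_tareas_mensaje_py tareas (formatear_tareas_mensaje_py tareas)

-- ===== LEMMAS AND PROOFS =====

def pvCompl (t : List (String × String)) : Bool :=
  (PySem.Str.lower (pvGet t "Estado" "") == "completada") ||
  (PySem.Str.lower (pvGet t "Estado" "") == "completa")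

def pvLinea (t : List (String × String)) : String :=
  (if pvGet t "Prioridad" "Media" == "Alta" then "🔴"
   else if pvGet t "Prioridad" "Media" == "Media" then "🟡" else "🟢") ++ " " ++
  pvGet t "Tarea" "Sin nombre"

theorem join_cons' (a : String) (l : List String) : String.join (a :: l) = a ++ String.join l := by
  simp [String.join_eq, String.ofList_append]

theorem join_append' (l m : List String) : String.join (l ++ m) = String.join l ++ String.join m := by
  simp [String.join_eq, String.ofList_append]

theorem joinAux (l : List String) (h : String) :
    PySem.Str.join "\n" (h :: l) = h ++ String.join (l.map (fun x => "\n" ++ x)) := by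
  induction l generalizing h with
  | nil => simp [PySem.Str.join, PySem.Chars.join, String.join, List.intercalate]
  | cons x l ih =>
      have hx := ih x
      simp only [PySem.Str.join, PySem.Chars.join, List.map_cons] at hx ⊢
      rw [show List.intercalate "\n".toList (h.toList :: x.toList :: l.map String.toList)
            = h.toList ++ "\n".toList ++ List.intercalate "\n".toList (x.toList :: l.map String.toList) by
            simp [List.intercalate]]
      rw [String.ofList_append, String.ofList_append, String.ofList_toList, hx, join_cons']
      simp [String.append_assoc]

theorem bFold (ts : List (List (String × String))) (s : String) (n : Int) :
    ts.foldl (fun (acc : String × Int) t =>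
      let estado := PySem.Str.lower (pvGet t "Estado" "")
      if estado == "completada" || estado == "completa" then (acc.1, acc.2 + 1)
      else
        let prioridad := pvGet t "Prioridad" "Media"
        let emoji := if prioridad == "Alta" then "🔴" else if prioridad == "Media" then "🟡" else "🟢"
        (acc.1 ++ "\n" ++ emoji ++ " " ++ pvGet t "Tarea" "Sin nombre", acc.2)) (s, n)
    = (s ++ String.join ((ts.filter (fun t => !pvCompl t)).map (fun t => "\n" ++ pvLinea t)),
       n + ((ts.filter pvCompl).length : Int)) := by
  induction ts generalizing s n with
  | nil => simp [String.join]
  | cons t ts ih =>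
      simp only [List.foldl_cons]
      by_cases hc : pvCompl t = true
      · rw [show (if PySem.Str.lower (pvGet t "Estado" "") == "completada" ||
              PySem.Str.lower (pvGet t "Estado" "") == "completa" then ((s, n).1, (s, n).2 + 1)
            else (((s, n).1 ++ "\n" ++ (if pvGet t "Prioridad" "Media" == "Alta" then "🔴"
              else if pvGet t "Prioridad" "Media" == "Media" then "🟡" else "🟢") ++ " " ++
              pvGet t "Tarea" "Sin nombre", (s, n).2) : String × Int))
            = ((s, n + 1) : String × Int) by simp [pvCompl] at hc; simp [hc]]
        rw [ih]
        simp [hc]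
        omega
      · rw [show (if PySem.Str.lower (pvGet t "Estado" "") == "completada" ||
              PySem.Str.lower (pvGet t "Estado" "") == "completa" then ((s, n).1, (s, n).2 + 1)
            else (((s, n).1 ++ "\n" ++ (if pvGet t "Prioridad" "Media" == "Alta" then "🔴"
              else if pvGet t "Prioridad" "Media" == "Media" then "🟡" else "🟢") ++ " " ++
              pvGet t "Tarea" "Sin nombre", (s, n).2) : String × Int))
            = ((s ++ "\n" ++ pvLinea t, n) : String × Int) by
              simp [pvCompl] at hc
              simp [hc.1, hc.2, pvLinea, String.append_assoc]]
        rw [ih]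
        simp [hc, join_cons', String.append_assoc]

theorem aFold (ps : List (List (String × String))) (init : List String) :
    ps.foldl (fun acc t =>
      let prioridad := pvGet t "Prioridad" "Media"
      let emoji := if prioridad == "Alta" then "🔴" else if prioridad == "Media" then "🟡" else "🟢"
      acc ++ [emoji ++ " " ++ pvGet t "Tarea" "Sin nombre"]) init = init ++ ps.map pvLinea := by
  induction ps generalizing init with
  | nil => simp
  | cons t ps ih =>
      simp only [List.foldl_cons]
      rw [ih]
      simp [pvLinea, String.append_assoc]

-- ===== VERDICT (by name: the statement is the Claim_ definition above) =====
theorem formatear_tareas_mensaje_py_spec : Claim_equal_formatear_tareas_mensaje_py := by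
  intro tareas _
  unfold Spec_formatear_tareas_mensaje_py formatear_tareas_mensaje_py formatear_tareas_mensaje_py_alt
  by_cases he : tareas.isEmpty = true
  · rw [if_pos he, if_pos he]
  · rw [if_neg he, if_neg he]
    have e1 : (fun (t : List (String × String)) =>
        (PySem.Str.lower (pvGet t "Estado" "") == "completada") ||
        (PySem.Str.lower (pvGet t "Estado" "") == "completa")) = pvCompl := rfl
    have e2 : (fun (t : List (String × String)) =>
        !((PySem.Str.lower (pvGet t "Estado" "") == "completada") ||
          (PySem.Str.lower (pvGet t "Estado" "") == "completa"))) = (fun t => !pvCompl t) := rfl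
    simp only [e1, e2, bFold, aFold]
    by_cases hc : tareas.filter pvCompl = []
    · simp [hc, joinAux, Function.comp_def]
    · have h1 : (List.filter pvCompl tareas).isEmpty = false := by simp [hc]
      have h2 : ((List.filter pvCompl tareas).length : Int) ≠ 0 := by
        simp [List.length_eq_zero_iff, hc]
      have hlit : ("\n" : String) ++ "\n✅ Completadas: " = "\n\n✅ Completadas: " := by decide
      simp only [h1, Bool.not_false, if_pos, Int.zero_add, h2, ne_eq, not_false_eq_true]
      rw [List.singleton_append, List.cons_append, joinAux, List.map_append, join_append']
      simp [String.join, String.append_assoc, Function.comp_def]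
      rw [← String.append_assoc, hlit]
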